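-- pv_equiv track=rewrite | github.com/Danish1309/Financial-Document-Analyzer- | tools.py | analyze_investment_tool
-- ===== SOURCE A (Python) =====
-- def analyze_investment_tool(financial_document_data):
--     """Analyze financial document data for investment insights
--
--     Args:
--         financial_document_data (str): The financial document content
--
--     Returns:
--         str: Investment analysis results
--     """
--     processed_data = financial_document_data
--
--     # Clean up double spaces
--     i = 0
--     while i < len(processed_data):
--         if processed_data[i:i+2] == "  ":
--             processed_data = processed_data[:i] + processed_data[i+1:]
--         else:
--             i += 1
--
--     analysis = {
--         "data_length": len(processed_data),
--         "cleaned_data": processed_data[:500] + "..." if len(processed_data) > 500 else processed_data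
--     }
--
--     return f"Investment Analysis Complete. Document analyzed: {analysis['data_length']} characters processed."
-- ===== SOURCE B (Python) =====
-- def analyze_investment_tool(financial_document_data):
--     """Analyze financial document data for investment insights.
--
--     Collapsing runs of spaces removes one character per space that is
--     immediately preceded by another space, so the processed length is
--     computed arithmetically without building the cleaned string.
--     """
--     removed = sum(1 for a, b in zip(financial_document_data, financial_document_data[1:])
--                   if a == ' ' and b == ' ')
--     n = len(financial_document_data) - removed
--     return f"Investment Analysis Complete. Document analyzed: {n} characters processed."
-- ===== Notes on version B (the rewrite author's own statement) =====
-- stated objective: faster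
-- what changed: Instead of repeatedly deleting a character from the string whenever a double space is found (rebuilding the string each time), B never builds a cleaned string: it counts, in one pass over adjacent pairs, the spaces immediately preceded by a space and subtracts that count from the original length.
import Mathlib
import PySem

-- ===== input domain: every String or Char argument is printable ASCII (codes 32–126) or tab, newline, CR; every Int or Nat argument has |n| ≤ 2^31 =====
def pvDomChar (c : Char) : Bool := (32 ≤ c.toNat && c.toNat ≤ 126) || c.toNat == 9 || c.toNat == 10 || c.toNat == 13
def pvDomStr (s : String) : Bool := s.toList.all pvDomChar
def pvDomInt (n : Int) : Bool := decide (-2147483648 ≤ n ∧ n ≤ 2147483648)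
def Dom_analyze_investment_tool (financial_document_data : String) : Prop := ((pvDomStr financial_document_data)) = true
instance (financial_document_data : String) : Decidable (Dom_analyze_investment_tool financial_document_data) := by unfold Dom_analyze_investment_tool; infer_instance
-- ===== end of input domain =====

-- B replaces A's repeated in-place double-space deletion by a single arithmetic
-- pass counting spaces preceded by a space (no cleaned string is built): faster.


-- ===== PORT A =====
-- A's while loop: while i < len(s): if s[i:i+2] == "  ": s = s[:i] + s[i+1:] else: i += 1.
-- Slices have non-negative in-range bounds here, so s[i:i+2] = (drop i).take 2,
-- s[:i] = take i, s[i+1:] = drop (i+1) — exact for these indices.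
def pvALoop (l : List Char) (i : Nat) : List Char :=
  if _h : i < l.length then
    if (l.drop i).take 2 = [' ', ' '] then
      pvALoop (l.take i ++ l.drop (i + 1)) i
    else
      pvALoop l (i + 1)
  else l
termination_by l.length - i
decreasing_by
  · have : (l.take i ++ l.drop (i + 1)).length < l.length := by
      simp [List.length_append, List.length_take, List.length_drop]; omega
    omega
  · omega

def analyze_investment_tool (financial_document_data : String) : String :=
  let processed := pvALoop financial_document_data.toList 0
  "Investment Analysis Complete. Document analyzed: "
    ++ PySem.Int.toStr (processed.length : Int)
    ++ " characters processed."

-- ===== PORT B =====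
def analyze_investment_tool_alt (financial_document_data : String) : String :=
  let l := financial_document_data.toList
  let removed : Nat :=
    (l.zip l.tail).foldl (fun acc p => if p.1 = ' ' ∧ p.2 = ' ' then acc + 1 else acc) 0
  "Investment Analysis Complete. Document analyzed: "
    ++ PySem.Int.toStr ((l.length : Int) - (removed : Int))
    ++ " characters processed."

-- ===== PRECONDITION & SPEC =====
def Spec_analyze_investment_tool (financial_document_data : String) (out : String) : Prop := out = analyze_investment_tool_alt financial_document_data
instance (financial_document_data : String) (out : String) : Decidable (Spec_analyze_investment_tool financial_document_data out) := by unfold Spec_analyze_investment_tool; infer_instance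

-- ===== CLAIM (what is proved, stated in full; the proofs are below) =====
def Claim_equal_analyze_investment_tool : Prop := ∀ (financial_document_data : String), Dom_analyze_investment_tool financial_document_data → Spec_analyze_investment_tool financial_document_data (analyze_investment_tool financial_document_data)

-- ===== LEMMAS AND PROOFS =====

-- number of indices j with l[j] = l[j+1] = ' '
def pvCnt : List Char → Nat
  | [] => 0
  | a :: t => (if a = ' ' ∧ t.head? = some ' ' then 1 else 0) + pvCnt t

lemma pvCnt_le (l : List Char) : pvCnt l ≤ l.length := by
  induction l with
  | nil => simp [pvCnt]
  | cons a t ih => simp only [pvCnt, List.length_cons]; split <;> omega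

-- pairs of l = pairs inside the first i+1 chars + pairs inside drop i (sharing l[i])
lemma pvCnt_split : ∀ (i : Nat) (l : List Char), i < l.length →
    pvCnt l = pvCnt (l.take (i + 1)) + pvCnt (l.drop i) := by
  intro i
  induction i with
  | zero =>
    intro l _
    cases l with
    | nil => simp [pvCnt]
    | cons a t => simp [pvCnt]
  | succ i ih =>
    intro l hl
    cases l with
    | nil => simp at hl
    | cons a t =>
      have ht : i < t.length := by simp at hl; omega
      have hh : (t.take (i + 1)).head? = t.head? := by
        cases t with
        | nil => simp at ht
        | cons b t' => simp
      simp only [pvCnt, List.take_succ_cons, List.drop_succ_cons, hh]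
      rw [ih t ht]; ring

lemma pvCnt_fold (l : List Char) (acc : Nat) :
    (l.zip l.tail).foldl (fun acc p => if p.1 = ' ' ∧ p.2 = ' ' then acc + 1 else acc) acc
      = acc + pvCnt l := by
  induction l generalizing acc with
  | nil => simp [pvCnt]
  | cons a t ih =>
    cases t with
    | nil => simp [pvCnt]
    | cons b t' =>
      simp only [List.tail_cons, List.zip_cons_cons, List.foldl_cons]
      simp only [List.tail_cons] at ih
      rw [ih]
      simp only [pvCnt, List.head?_cons]
      split <;> rename_i h
      · have : a = ' ' ∧ (some b : Option Char) = some ' ' := by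
          exact ⟨h.1, by simp [h.2]⟩
        simp only [if_pos this]; omega
      · have : ¬ (a = ' ' ∧ (some b : Option Char) = some ' ') := by
          intro hc; exact h ⟨hc.1, by simpa using hc.2⟩
        simp only [if_neg this]; omega

-- loop invariant: no double space within the first i+1 characters;
-- then the loop's result has length  l.length - pvCnt l.
lemma pvALoop_length : ∀ (l : List Char) (i : Nat),
    pvCnt (l.take (i + 1)) = 0 →
    (pvALoop l i).length = l.length - pvCnt l := by
  intro l i
  induction l, i using pvALoop.induct with
  | case1 l i h hpair ih =>
    -- remove branch: drop i l = ' ' :: ' ' :: t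
    intro hinv
    obtain ⟨t, hdrop⟩ : ∃ t, l.drop i = ' ' :: ' ' :: t := by
      have hsp : l.drop i = (l.drop i).take 2 ++ (l.drop i).drop 2 :=
        (List.take_append_drop _ _).symm
      refine ⟨(l.drop i).drop 2, ?_⟩
      conv_lhs => rw [hsp, hpair]
      rfl
    have hlen : (l.take i).length = i := by
      simp [List.length_take]; omega
    have hl : l = l.take i ++ ' ' :: ' ' :: t := by
      conv_lhs => rw [← List.take_append_drop i l]
      rw [hdrop]
    -- take (i+1) l = take i l ++ [' ']
    have htake : l.take (i + 1) = l.take i ++ [' '] := by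
      conv_lhs => rw [hl]
      rw [List.take_append, hlen]
      simp
    set l' := l.take i ++ l.drop (i + 1) with hl'def
    have hdrop1 : l.drop (i + 1) = ' ' :: t := by
      conv_lhs => rw [hl]
      rw [List.drop_append, hlen]
      simp
    have hl' : l' = l.take i ++ ' ' :: t := by rw [hl'def, hdrop1]
    have hl'len : l'.length = l.length - 1 := by
      rw [hl', hl]; simp; omega
    -- take (i+1) l' = take i l ++ [' ']  and  drop i l' = ' ' :: t
    have htake' : l'.take (i + 1) = l.take i ++ [' '] := by
      rw [hl', List.take_append, hlen]
      have : (l.take i).take (i + 1) = l.take i := by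
        rw [List.take_take]; congr 1; omega
      rw [this]
      simp
    have hdrop' : l'.drop i = ' ' :: t := by
      rw [hl', List.drop_append, hlen]
      simp
    have hi' : i < l'.length := by
      have := congrArg List.length hdrop'
      simp [List.length_drop] at this
      omega
    -- pvCnt of l and l'
    have hc : pvCnt l = pvCnt (l.take i ++ [' ']) + (1 + pvCnt (' ' :: t)) := by
      rw [pvCnt_split i l h, htake, hdrop]
      simp [pvCnt]
    have hc' : pvCnt l' = pvCnt (l.take i ++ [' ']) + pvCnt (' ' :: t) := by
      rw [pvCnt_split i l' hi', htake', hdrop']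
    have hz : pvCnt (l.take i ++ [' ']) = 0 := by rw [← htake]; exact hinv
    have hrec := ih (by rw [htake']; exact hz)
    rw [pvALoop]
    simp only [h, hpair, if_pos, dif_pos]
    rw [hrec, hl'len, hc, hc', hz]
    have := pvCnt_le (' ' :: t)
    have hlenl : l.length = i + (2 + t.length) := by
      rw [hl]; simp [hlen]; omega
    omega
  | case2 l i h hpair ih =>
    -- advance branch: pair at (i, i+1) is not a double space
    intro hinv
    have hnext : pvCnt (l.take (i + 1 + 1)) = 0 := by
      by_cases h1 : i + 1 < l.length
      · -- l = take i ++ a :: b :: t with ¬(a = ' ' ∧ b = ' ')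
        obtain ⟨a, b, t, hdrop⟩ : ∃ a b t, l.drop i = a :: b :: t := by
          rcases hd : l.drop i with _ | ⟨a, _ | ⟨b, t⟩⟩
          · have := congrArg List.length hd; simp [List.length_drop] at this; omega
          · have := congrArg List.length hd; simp [List.length_drop] at this; omega
          · exact ⟨a, b, t, rfl⟩
        have hnab : ¬ (a = ' ' ∧ b = ' ') := by
          intro hc; apply hpair; rw [hdrop, hc.1, hc.2]; rfl
        have hlen : (l.take i).length = i := by simp [List.length_take]; omega
        have hl : l = l.take i ++ a :: b :: t := by
          conv_lhs => rw [← List.take_append_drop i l]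
          rw [hdrop]
        have htake2 : l.take (i + 2) = l.take i ++ [a, b] := by
          conv_lhs => rw [hl]
          rw [List.take_append, hlen]
          have : (l.take i).take (i + 2) = l.take i := by
            rw [List.take_take]; congr 1; omega
          rw [this]
          simp
        have hiL : i < (l.take (i + 2)).length := by
          rw [htake2]; simp [hlen]
        have hLt : (l.take (i + 2)).take (i + 1) = l.take (i + 1) := by
          rw [List.take_take]; congr 1; omega
        have hLd : (l.take (i + 2)).drop i = [a, b] := by
          rw [htake2, List.drop_append, hlen]
          simp
        have hsplit := pvCnt_split i (l.take (i + 2)) hiL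
        rw [hLt, hLd, hinv] at hsplit
        have hab : pvCnt [a, b] = 0 := by
          simp only [pvCnt, List.head?_cons]
          rw [if_neg (by simpa using hnab)]
          simp
        rw [show i + 1 + 1 = i + 2 from rfl, hsplit, hab]
      · rw [List.take_of_length_le (by omega), ← List.take_of_length_le (l := l) (i := i + 1) (by omega)]
        exact hinv
    rw [pvALoop]
    simp only [h, dif_pos]
    rw [if_neg hpair]
    exact ih hnext
  | case3 l i h =>
    intro hinv
    rw [pvALoop, dif_neg h]
    have : l.take (i + 1) = l := List.take_of_length_le (by omega)
    rw [this] at hinv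
    omega

-- ===== VERDICT (by name: the statement is the Claim_ definition above) =====
theorem analyze_investment_tool_spec : Claim_equal_analyze_investment_tool := by
  intro s _
  unfold Spec_analyze_investment_tool analyze_investment_tool analyze_investment_tool_alt
  set l := s.toList with hl
  have hinv : pvCnt (l.take 1) = 0 := by
    cases l with
    | nil => simp [pvCnt]
    | cons a t => simp [pvCnt]
  have hlen := pvALoop_length l 0 hinv
  have hfold := pvCnt_fold l 0
  have hle := pvCnt_le l
  show "Investment Analysis Complete. Document analyzed: "
        ++ PySem.Int.toStr (((pvALoop l 0).length : Nat) : Int)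
        ++ " characters processed."
      = "Investment Analysis Complete. Document analyzed: "
        ++ PySem.Int.toStr ((l.length : Int)
            - (((l.zip l.tail).foldl
                (fun acc p => if p.1 = ' ' ∧ p.2 = ' ' then acc + 1 else acc) 0 : Nat) : Int))
        ++ " characters processed."
  have hint : (((pvALoop l 0).length : Nat) : Int)
      = (l.length : Int)
        - (((l.zip l.tail).foldl
            (fun acc p => if p.1 = ' ' ∧ p.2 = ' ' then acc + 1 else acc) 0 : Nat) : Int) := by
    rw [hfold, hlen]
    omega
  rw [hint]
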